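-- pv_equiv track=rewrite | github.com/wintor12/wechat_project | baseline_pred_position.py | filter_text
-- ===== SOURCE A (Python) =====
-- def filter_text(X, T, Y, P, TIME):
--     f_X, f_t, f_y, f_p, f_time = [], [], [], [], []
--     for x, t, y, p, time in zip(X, T, Y, P, TIME):
--         if len(x.split()) > 10:
--             f_X.append(x)
--             f_t.append(t)
--             f_y.append(y)
--             f_p.append(p)
--             f_time.append(time)
--     return f_X, f_t, f_y, f_p, f_time
-- ===== SOURCE B (Python) =====
-- def _gt10(s):
--     # count word starts by scanning characters; early exit past 10 words
--     cnt = 0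
--     prev_space = True
--     for ch in s:
--         if ch.isspace():
--             prev_space = True
--         elif prev_space:
--             cnt += 1
--             if cnt > 10:
--                 return True
--             prev_space = False
--     return False
--
-- def filter_text(X, T, Y, P, TIME):
--     n = min(len(X), len(T), len(Y), len(P), len(TIME))
--     keep = [i for i in range(n) if _gt10(X[i])]
--     return ([X[i] for i in keep], [T[i] for i in keep], [Y[i] for i in keep],
--             [P[i] for i in keep], [TIME[i] for i in keep])
-- ===== Notes on version B (the rewrite author's own statement) =====
-- stated objective: alternative
-- what changed: B builds a keep-index list from X alone over range(min(lengths)) and gathers each of the five outputs independently by indexing (no zip of rows, no parallel accumulators), and tests the word count by a character scan counting word starts with early exit instead of building the split list.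
import Mathlib
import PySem

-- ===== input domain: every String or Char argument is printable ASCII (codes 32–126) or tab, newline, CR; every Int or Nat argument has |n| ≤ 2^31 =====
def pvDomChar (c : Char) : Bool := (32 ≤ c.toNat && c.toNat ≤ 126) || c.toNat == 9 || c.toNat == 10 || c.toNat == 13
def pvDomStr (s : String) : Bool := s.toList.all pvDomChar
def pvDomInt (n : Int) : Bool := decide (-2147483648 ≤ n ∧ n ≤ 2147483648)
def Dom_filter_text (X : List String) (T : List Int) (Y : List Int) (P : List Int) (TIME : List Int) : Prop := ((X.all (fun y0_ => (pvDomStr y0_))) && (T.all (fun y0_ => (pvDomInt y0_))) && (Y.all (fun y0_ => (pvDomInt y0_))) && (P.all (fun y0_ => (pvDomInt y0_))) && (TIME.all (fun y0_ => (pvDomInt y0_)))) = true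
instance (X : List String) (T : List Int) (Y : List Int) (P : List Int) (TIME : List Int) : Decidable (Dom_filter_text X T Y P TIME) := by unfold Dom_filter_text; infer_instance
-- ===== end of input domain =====

-- B replaces A's zip-and-five-accumulators pass by an index-gather: a keep-index list is
-- built from X alone over range(min(lengths)) and each output is gathered independently,
-- with the word test done by a character scan counting word starts (early exit), not by split().

-- ===== PORT A =====
-- Python's zip over five lists (stops at the shortest)
def pvZip5 : List String → List Int → List Int → List Int → List Int →
    List (String × Int × Int × Int × Int)
  | x :: xs, t :: ts, y :: ys, p :: ps, m :: ms => (x, t, y, p, m) :: pvZip5 xs ts ys ps ms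
  | _, _, _, _, _ => []

def filter_text (X : List String) (T : List Int) (Y : List Int) (P : List Int) (TIME : List Int) : List String × List Int × List Int × List Int × List Int :=
  (pvZip5 X T Y P TIME).foldl
    (fun acc r =>
      if (PySem.Str.split₀ r.1).length > 10 then
        (acc.1 ++ [r.1], acc.2.1 ++ [r.2.1], acc.2.2.1 ++ [r.2.2.1],
         acc.2.2.2.1 ++ [r.2.2.2.1], acc.2.2.2.2 ++ [r.2.2.2.2])
      else acc)
    ([], [], [], [], [])

-- ===== PORT B =====
-- the for-loop of _gt10: state (cnt, prev_space), early return once cnt > 10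
def pvScan : List Char → Nat → Bool → Bool
  | [], _, _ => false
  | c :: r, cnt, prevSpace =>
    if PySem.Chars.isspace c then pvScan r cnt true
    else if prevSpace then
      (if cnt + 1 > 10 then true else pvScan r (cnt + 1) false)
    else pvScan r cnt false

def pvGt10 (s : String) : Bool := pvScan s.toList 0 true

def filter_text_alt (X : List String) (T : List Int) (Y : List Int) (P : List Int) (TIME : List Int) : List String × List Int × List Int × List Int × List Int :=
  let n := min (min (min (min X.length T.length) Y.length) P.length) TIME.length
  let keep := (List.range n).filter (fun i => pvGt10 (X.getD i ""))
  (keep.map (fun i => X.getD i ""), keep.map (fun i => T.getD i 0),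
   keep.map (fun i => Y.getD i 0), keep.map (fun i => P.getD i 0),
   keep.map (fun i => TIME.getD i 0))

-- ===== PRECONDITION & SPEC =====
def Spec_filter_text (X : List String) (T : List Int) (Y : List Int) (P : List Int) (TIME : List Int) (out : List String × List Int × List Int × List Int × List Int) : Prop := out = filter_text_alt X T Y P TIME
instance (X : List String) (T : List Int) (Y : List Int) (P : List Int) (TIME : List Int) (out : List String × List Int × List Int × List Int × List Int) : Decidable (Spec_filter_text X T Y P TIME out) := by unfold Spec_filter_text; infer_instance

-- ===== CLAIM =====
def Claim_equal_filter_text : Prop := ∀ (X : List String) (T : List Int) (Y : List Int) (P : List Int) (TIME : List Int), Dom_filter_text X T Y P TIME → Spec_filter_text X T Y P TIME (filter_text X T Y P TIME)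

-- ===== LEMMAS AND PROOFS =====

-- number of word starts in `r`, given whether we are currently inside a word
def pvWC : List Char → Bool → Nat
  | [], _ => 0
  | c :: r, inW =>
    if PySem.Chars.isspace c then pvWC r false
    else (if inW then 0 else 1) + pvWC r true

lemma wc_go (rest : List Char) : ∀ (cur : List Char) (acc : List (List Char)),
    (PySem.Chars.split₀.go rest cur acc).length
      = acc.length + (if cur.isEmpty then 0 else 1) + pvWC rest (!cur.isEmpty) := by
  induction rest with
  | nil =>
    intro cur acc
    cases cur <;> simp [PySem.Chars.split₀.go, pvWC]
  | cons c r ih =>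
    intro cur acc
    by_cases h : PySem.Chars.isspace c
    · cases cur <;> simp [PySem.Chars.split₀.go, h, pvWC, ih]
    · cases cur <;> simp [PySem.Chars.split₀.go, h, pvWC, ih]
      omega

lemma scan_eq (r : List Char) : ∀ (cnt : Nat) (prev : Bool), cnt ≤ 10 →
    pvScan r cnt prev = decide (cnt + pvWC r (!prev) > 10) := by
  induction r with
  | nil => intro cnt prev h; simp [pvScan, pvWC]; omega
  | cons c r ih =>
    intro cnt prev h
    by_cases hsp : PySem.Chars.isspace c
    · simp [pvScan, hsp, pvWC, ih cnt true h]
    · cases prev with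
      | false => simp [pvScan, hsp, pvWC, ih cnt false h]
      | true =>
        by_cases hc : cnt + 1 > 10
        · have : cnt = 10 := by omega
          simp [pvScan, hsp, pvWC, this]
        · simp [pvScan, hsp, hc, pvWC, ih (cnt + 1) false (by omega)]
          omega

lemma gt10_eq (s : String) : pvGt10 s = decide ((PySem.Str.split₀ s).length > 10) := by
  have h := wc_go s.toList [] []
  simp [pvGt10, scan_eq s.toList 0 true (by omega), PySem.Str.split₀,
    PySem.Chars.split₀, h]

-- A's accumulator loop over the zipped rows equals "filter, then project".
lemma filter_text_loop_eq (rs : List (String × Int × Int × Int × Int))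
    (a : List String) (b c d e : List Int) :
    rs.foldl
      (fun acc r =>
        if (PySem.Str.split₀ r.1).length > 10 then
          (acc.1 ++ [r.1], acc.2.1 ++ [r.2.1], acc.2.2.1 ++ [r.2.2.1],
           acc.2.2.2.1 ++ [r.2.2.2.1], acc.2.2.2.2 ++ [r.2.2.2.2])
        else acc)
      (a, b, c, d, e)
    = (a ++ (rs.filter (fun r => (PySem.Str.split₀ r.1).length > 10)).map (·.1),
       b ++ (rs.filter (fun r => (PySem.Str.split₀ r.1).length > 10)).map (·.2.1),
       c ++ (rs.filter (fun r => (PySem.Str.split₀ r.1).length > 10)).map (·.2.2.1),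
       d ++ (rs.filter (fun r => (PySem.Str.split₀ r.1).length > 10)).map (·.2.2.2.1),
       e ++ (rs.filter (fun r => (PySem.Str.split₀ r.1).length > 10)).map (·.2.2.2.2)) := by
  induction rs generalizing a b c d e with
  | nil => simp
  | cons r rs ih =>
    by_cases h : (PySem.Str.split₀ r.1).length > 10 <;>
      simp [List.foldl_cons, h, ih]

-- the filtered projections of the zip equal B's index-gather
lemma zip_filter_eq_gather :
    ∀ (X : List String) (T Y P TIME : List Int),
    (let rs := (pvZip5 X T Y P TIME).filter (fun r => (PySem.Str.split₀ r.1).length > 10)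
     ((rs.map (·.1) : List String), rs.map (·.2.1), rs.map (·.2.2.1),
      rs.map (·.2.2.2.1), rs.map (·.2.2.2.2)))
    = filter_text_alt X T Y P TIME := by
  intro X
  induction X with
  | nil => intro T Y P TIME; cases T <;> cases Y <;> cases P <;> cases TIME <;>
      simp [pvZip5, filter_text_alt]
  | cons x xs ih =>
    intro T Y P TIME
    cases T with
    | nil => simp [pvZip5, filter_text_alt]
    | cons t ts =>
      cases Y with
      | nil => simp [pvZip5, filter_text_alt]
      | cons y ys =>
        cases P with
        | nil => simp [pvZip5, filter_text_alt]
        | cons p ps =>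
          cases TIME with
          | nil => simp [pvZip5, filter_text_alt]
          | cons m ms =>
            have ihh := ih ts ys ps ms
            simp only [filter_text_alt] at ihh ⊢
            simp only [pvZip5, List.length_cons, Nat.succ_min_succ,
              List.range_succ_eq_map, List.filter_cons, List.filter_map,
              gt10_eq, List.getD_cons_zero, List.getD_cons_succ,
              Function.comp_def] at ihh ⊢
            obtain ⟨h1, h2, h3, h4, h5⟩ : _ ∧ _ ∧ _ ∧ _ ∧ _ := by
              simpa [Prod.ext_iff] using ihh
            by_cases h : (PySem.Str.split₀ x).length > 10 <;>
              simp [h, h1, h2, h3, h4, h5]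

-- ===== VERDICT =====
theorem filter_text_spec : Claim_equal_filter_text := by
  intro X T Y P TIME _
  show filter_text X T Y P TIME = filter_text_alt X T Y P TIME
  unfold filter_text
  rw [filter_text_loop_eq, ← zip_filter_eq_gather X T Y P TIME]
  simp
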